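-- pv_equiv track=rewrite | github.com/laha0006/AdventOfCode2023 | 4/4.py | score_of_card
-- ===== SOURCE A (Python) =====
-- def score_of_card(card):
--     winning = card[0]
--     gotten = card[1]
--
--     winners = 0
--     score = 0
--
--     for num in gotten:
--         if num in winning:
--             if winners == 0:
--                 score += 1
--                 winners += 1
--             else:
--                 score *= 2
--                 winners += 1
--     return score
-- ===== SOURCE B (Python) =====
-- def score_of_card(card):
--     winning = card[0]
--     count = sum(1 for num in card[1] if num in winning)
--     return 2 ** (count - 1) if count else 0
-- ===== Notes on version B (the rewrite author's own statement) =====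
-- stated objective: simpler
-- what changed: Replaces the stateful doubling loop (first match adds 1, later matches multiply by 2) with a single match count and the closed form 2**(count-1), 0 if no matches.
import Mathlib
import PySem

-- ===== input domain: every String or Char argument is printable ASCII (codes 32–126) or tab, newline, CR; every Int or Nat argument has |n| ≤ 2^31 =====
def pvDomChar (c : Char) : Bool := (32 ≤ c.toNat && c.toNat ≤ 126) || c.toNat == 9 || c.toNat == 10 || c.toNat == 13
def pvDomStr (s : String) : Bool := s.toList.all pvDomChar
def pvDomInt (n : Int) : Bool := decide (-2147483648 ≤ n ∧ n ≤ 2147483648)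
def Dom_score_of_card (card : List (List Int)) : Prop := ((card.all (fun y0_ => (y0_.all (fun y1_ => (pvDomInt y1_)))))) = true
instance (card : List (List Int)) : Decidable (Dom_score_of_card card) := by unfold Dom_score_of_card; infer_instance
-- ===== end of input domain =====

-- B replaces A's stateful doubling loop with a match count and the closed form 2^(count-1) (0 if no match).


-- ===== PORT A =====
-- card[0] / card[1] raise IndexError on short lists; Pre_ excludes those, so getD is exact inside Pre_.
def score_of_card (card : List (List Int)) : Int :=
  let winning := (PySem.List.pyGet? card 0).getD []
  let gotten := (PySem.List.pyGet? card 1).getD []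
  let st := gotten.foldl (fun (p : Int × Int) num =>
    if num ∈ winning then
      if p.1 = 0 then (p.1 + 1, p.2 + 1) else (p.1 + 1, p.2 * 2)
    else p) (0, 0)
  st.2

-- ===== PORT B =====
def score_of_card_alt (card : List (List Int)) : Int :=
  let winning := (PySem.List.pyGet? card 0).getD []
  let count := ((PySem.List.pyGet? card 1).getD []).countP (fun num => num ∈ winning)
  if count ≠ 0 then 2 ^ (count - 1) else 0

-- ===== PRECONDITION & SPEC =====
-- A (and B) raise IndexError on card[0]/card[1] when card has fewer than two rows.
def Pre_score_of_card (card : List (List Int)) : Prop := 2 ≤ card.length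
instance (card : List (List Int)) : Decidable (Pre_score_of_card card) := by unfold Pre_score_of_card; infer_instance
def pvWitness_score_of_card : List (List Int) := [[1, 2, 3], [2, 3, 5]]

def Spec_score_of_card (card : List (List Int)) (out : Int) : Prop := out = score_of_card_alt card
instance (card : List (List Int)) (out : Int) : Decidable (Spec_score_of_card card out) := by unfold Spec_score_of_card; infer_instance

-- ===== CLAIM (what is proved, stated in full; the proofs are below) =====
def Claim_equal_score_of_card : Prop := ∀ (card : List (List Int)), Dom_score_of_card card → Pre_score_of_card card → Spec_score_of_card card (score_of_card card)

-- ===== LEMMAS AND PROOFS =====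
-- closed-form value of the loop state as a function of the match count
def pvVal (w : Nat) : Int := if w = 0 then 0 else 2 ^ (w - 1)

theorem pvLoop (winning : List Int) (l : List Int) (w : Nat) :
    l.foldl (fun (p : Int × Int) num =>
      if num ∈ winning then
        if p.1 = 0 then (p.1 + 1, p.2 + 1) else (p.1 + 1, p.2 * 2)
      else p) ((w : Int), pvVal w)
    = ((((w + l.countP (fun num => num ∈ winning)) : Nat) : Int),
       pvVal (w + l.countP (fun num => num ∈ winning))) := by
  induction l generalizing w with
  | nil => simp
  | cons x xs ih =>
    by_cases hx : x ∈ winning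
    · have h2 : (if (w : Int) = 0 then ((w : Int) + 1, pvVal w + 1) else ((w : Int) + 1, pvVal w * 2))
          = (((w + 1 : Nat) : Int), pvVal (w + 1)) := by
        rcases Nat.eq_zero_or_pos w with hw | hw
        · subst hw; simp [pvVal]
        · have hne : ¬ ((w : Int) = 0) := by exact_mod_cast Nat.pos_iff_ne_zero.mp hw
          have hwne : ¬ (w = 0) := by omega
          have hw1 : ¬ (w + 1 = 0) := by omega
          simp only [pvVal]
          rw [if_neg hne, if_neg hwne, if_neg hw1]
          have hs : w + 1 - 1 = (w - 1) + 1 := by omega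
          rw [hs, pow_succ, show ((w : Int) + 1) = ((w + 1 : Nat) : Int) from by push_cast; ring]
      simp only [List.foldl_cons, hx, if_pos, List.countP_cons, decide_true]
      rw [h2, ih (w + 1)]
      congr 2 <;> omega
    · simp only [List.foldl_cons, hx, if_false, List.countP_cons, decide_false]
      rw [if_neg (by simp), ih w]
      simp
-- ===== VERDICT (by name: the statement is the Claim_ definition above) =====
theorem score_of_card_spec : Claim_equal_score_of_card := by
  intro card _ _
  unfold Spec_score_of_card score_of_card score_of_card_alt
  dsimp only
  have hL := pvLoop ((PySem.List.pyGet? card 0).getD []) ((PySem.List.pyGet? card 1).getD []) 0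
  simp only [Nat.zero_add] at hL
  rw [show ((0 : Int), (0 : Int)) = (((0 : Nat) : Int), pvVal 0) from by simp [pvVal], hL]
  by_cases h : List.countP (fun num => decide (num ∈ (PySem.List.pyGet? card 0).getD []))
      ((PySem.List.pyGet? card 1).getD []) = 0 <;>
    simp [pvVal, h]
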